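-- pv_equiv track=rewrite | github.com/lifecycles1/competitive-programming | codesignal/arcade/2.core/11.spring of integration/10.fileNaming.py | fileNaming
-- ===== SOURCE A (Python) =====
-- def fileNaming(names):
--     for i in range(len(names)):
--         if names[i] in names[:i]:
--             k = 1
--             while names[i] + '(' + str(k) + ')' in names[:i]:
--                 k += 1
--             names[i] = names[i] + '(' + str(k) + ')'
--     return names
-- ===== SOURCE B (Python) =====
-- def fileNaming(names):
--     # Slot-allocation algorithm: every used name of the shape base+'('+str(k)+')'
--     # occupies integer slot k of its base.  A per-(base,slot) "next free" pointer
--     # structure with path compression hands out the least free slot directly, so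
--     # there is no candidate-probing loop.  (A mutates its argument; B does not.)
--     used = set()
--     parent = {}  # (base, k) -> k': slots k..k'-1 of base are all taken
--
--     def find(base, k):
--         chain = []
--         while (base, k) in parent:
--             chain.append(k)
--             k = parent[(base, k)]
--         for c in chain:  # path compression
--             parent[(base, c)] = k
--         return k
--
--     def parse(name):
--         # (base, k) if name == base + '(' + str(k) + ')' with k >= 1, else None
--         rev = name[::-1]
--         if not rev.startswith(')'):
--             return None
--         rest = rev[1:]
--         j = 0
--         while j < len(rest) and rest[j].isdigit():
--             j += 1
--         ds = rest[:j]
--         if not rest[j:].startswith('('):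
--             return None
--         if ds == '' or ds[-1] == '0':
--             return None
--         return (rest[j + 1:][::-1], int(ds[::-1]))
--
--     out = []
--     for name in names:
--         if name in used:
--             r = find(name, 1)
--             new = name + '(' + str(r) + ')'
--             parent[(name, r)] = r + 1
--             used.add(new)
--             out.append(new)
--         else:
--             used.add(name)
--             p = parse(name)
--             if p is not None:
--                 parent[p] = p[1] + 1
--             out.append(name)
--     return out
-- ===== Notes on version B (the rewrite author's own statement) =====
-- stated objective: faster
-- what changed: B drops A's candidate-probing while-loop over a rescanned prefix entirely: it parses every used name into a (base, slot) pair and allocates the least free slot per base through a next-free-pointer structure with path compression (union-find-style first-fit allocation), over a hash set used only for duplicate detection; B does not mutate its argument (return value identical).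
import Mathlib
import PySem

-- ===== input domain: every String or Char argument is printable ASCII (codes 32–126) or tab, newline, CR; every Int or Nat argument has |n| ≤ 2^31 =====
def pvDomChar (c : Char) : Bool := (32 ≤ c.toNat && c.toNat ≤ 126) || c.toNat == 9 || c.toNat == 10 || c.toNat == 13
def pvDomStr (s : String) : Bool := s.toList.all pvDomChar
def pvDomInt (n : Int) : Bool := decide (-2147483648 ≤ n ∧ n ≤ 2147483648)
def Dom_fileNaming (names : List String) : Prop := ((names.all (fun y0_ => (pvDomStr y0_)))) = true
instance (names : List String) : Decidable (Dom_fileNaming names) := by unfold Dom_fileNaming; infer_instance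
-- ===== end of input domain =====

-- B replaces A's candidate-probing while-loop over the rescanned prefix with slot allocation:
-- every used name of shape base+'('+str(k)+')' occupies slot k of its base, and the least free
-- slot is handed out by a next-free-pointer structure with path compression; same return value,
-- but B does not mutate its argument (the equivalence is about the return value only).

-- ===== PORT A =====
-- names[i] + '(' + str(k) + ')'
def aNewName (name : String) (k : Int) : String := name ++ "(" ++ PySem.Int.toStr k ++ ")"

-- 'k = 1; while names[i]+'('+str(k)+')' in names[:i]: k += 1'; fuel is only a totality guard
-- (|prefix|+1 candidates cannot all lie in the prefix)
def aFind (pre : List String) (name : String) (k : Int) : Nat → Int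
  | 0 => k
  | fuel+1 => if pre.contains (aNewName name k) then aFind pre name (k+1) fuel else k

-- A mutates names in place; the port threads the already-renamed prefix 'done' (= names[:i])
def aLoop (done : List String) : List String → List String
  | [] => done
  | n :: rest =>
    if done.contains n then
      aLoop (done ++ [aNewName n (aFind done n 1 (done.length + 1))]) rest
    else
      aLoop (done ++ [n]) rest

def fileNaming (names : List String) : List String := aLoop [] names

-- ===== PORT B =====
-- name + '(' + str(r) + ')'
def bNew (base : String) (k : Int) : String := base ++ "(" ++ PySem.Int.toStr k ++ ")"

-- int(ds[::-1]) for the checked nonempty digit string ds (read right-to-left); exact there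
def decodeDigits (cs : List Char) : Nat := cs.foldl (fun a c => 10 * a + (c.toNat - 48)) 0

-- parse(name): (base, k) if name == base + '(' + str(k) + ')' with k >= 1, else None
def bParse (name : String) : Option (String × Int) :=
  match name.toList.reverse with
  | [] => none
  | c :: rest =>
    if c = ')' then
      match rest.dropWhile Char.isDigit with
      | [] => none
      | c2 :: btl =>
        if c2 = '(' then
          if rest.takeWhile Char.isDigit = [] then none
          else if (rest.takeWhile Char.isDigit).getLast? = some '0' then none
          else some (String.ofList btl.reverse,
                     ((decodeDigits (rest.takeWhile Char.isDigit).reverse : Nat) : Int))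
        else none
    else none

-- find(base, k): follow the taken-slot chain to its root, returning (root, visited chain);
-- the Python while-loop is unbounded, the fuel is only a totality guard (proved sufficient
-- at the call site: the chain is strictly increasing below a free slot)
def bFind (parent : PySem.Dict (String × Int) Int) (b : String) (k : Int) :
    Nat → Int × List Int
  | 0 => (k, [])
  | fuel+1 =>
    match parent.get? (b, k) with
    | none => (k, [])
    | some m => ((bFind parent b m fuel).1, k :: (bFind parent b m fuel).2)

def bLoop (used : PySem.Set String) (parent : PySem.Dict (String × Int) Int)
    (out : List String) : List String → List String
  | [] => out
  | n :: rest =>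
    if PySem.Set.contains used n then
      bLoop
        (PySem.Set.add used (bNew n (bFind parent n 1 (used.length + 1)).1))
        ((((bFind parent n 1 (used.length + 1)).2.foldl
            (fun d c => d.insert (n, c) (bFind parent n 1 (used.length + 1)).1) parent).insert
          (n, (bFind parent n 1 (used.length + 1)).1)
          ((bFind parent n 1 (used.length + 1)).1 + 1)))
        (out ++ [bNew n (bFind parent n 1 (used.length + 1)).1]) rest
    else
      match bParse n with
      | some bk => bLoop (PySem.Set.add used n) (parent.insert bk (bk.2 + 1)) (out ++ [n]) rest
      | none => bLoop (PySem.Set.add used n) parent (out ++ [n]) rest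

def fileNaming_alt (names : List String) : List String :=
  bLoop PySem.Set.empty PySem.Dict.empty [] names

-- ===== PRECONDITION & SPEC =====
def Spec_fileNaming (names : List String) (out : List String) : Prop := out = fileNaming_alt names
instance (names : List String) (out : List String) : Decidable (Spec_fileNaming names out) := by unfold Spec_fileNaming; infer_instance

-- ===== CLAIM (what is proved, stated in full; the proofs are below) =====
def Claim_equal_fileNaming : Prop := ∀ (names : List String), Dom_fileNaming names → Spec_fileNaming names (fileNaming names)

-- ===== LEMMAS AND PROOFS =====

theorem digitChar_toNat (d : Nat) (h : d < 10) : (Nat.digitChar d).toNat = 48 + d := by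
  interval_cases d <;> decide

theorem char_eq_of_toNat_eq {c d : Char} (h : c.toNat = d.toNat) : c = d :=
  Char.ext (UInt32.toNat_inj.mp h)

theorem isDigit_iff (c : Char) : c.isDigit = true ↔ 48 ≤ c.toNat ∧ c.toNat ≤ 57 := by
  rw [Char.isDigit]
  simp only [Bool.and_eq_true, decide_eq_true_eq, ge_iff_le, UInt32.le_iff_toNat_le]
  rfl

theorem digitChar_eq_self (c : Char) (h : c.isDigit = true) :
    Nat.digitChar (c.toNat - 48) = c := by
  rw [isDigit_iff] at h
  apply char_eq_of_toNat_eq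
  rw [digitChar_toNat (c.toNat - 48) (by omega)]
  omega

theorem decode_append (l : List Char) (c : Char) :
    decodeDigits (l ++ [c]) = 10 * decodeDigits l + (c.toNat - 48) := by
  simp [decodeDigits, List.foldl_append]

theorem decode_toDigits (n : Nat) : decodeDigits (Nat.toDigits 10 n) = n := by
  induction n using Nat.strong_induction_on with
  | _ n ih =>
    rw [Nat.toDigits_eq_if (by norm_num)]
    by_cases h : n < 10
    · rw [if_pos h]
      show decodeDigits ([] ++ [Nat.digitChar n]) = n
      rw [decode_append, digitChar_toNat n h]
      simp [decodeDigits]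
    · rw [if_neg h, decode_append, ih (n / 10) (by omega), digitChar_toNat (n % 10) (by omega)]
      omega

theorem toDigits_all_digit (n : Nat) : ∀ c ∈ Nat.toDigits 10 n, c.isDigit = true := by
  induction n using Nat.strong_induction_on with
  | _ n ih =>
    rw [Nat.toDigits_eq_if (by norm_num)]
    by_cases h : n < 10
    · rw [if_pos h]
      intro c hc
      simp only [List.mem_singleton] at hc
      subst hc
      rw [isDigit_iff, digitChar_toNat n h]
      omega
    · rw [if_neg h]
      intro c hc
      rcases List.mem_append.mp hc with h1 | h1
      · exact ih (n / 10) (by omega) c h1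
      · simp only [List.mem_singleton] at h1
        subst h1
        rw [isDigit_iff, digitChar_toNat (n % 10) (by omega)]
        omega

theorem toDigits_head_ne_zero (n : Nat) (hn : 1 ≤ n) :
    ∃ c l, Nat.toDigits 10 n = c :: l ∧ c ≠ '0' := by
  induction n using Nat.strong_induction_on with
  | _ n ih =>
    rw [Nat.toDigits_eq_if (by norm_num)]
    by_cases h : n < 10
    · rw [if_pos h]
      refine ⟨Nat.digitChar n, [], rfl, ?_⟩
      intro hc
      have := congrArg Char.toNat hc
      rw [digitChar_toNat n h] at this
      have : (48 : Nat) + n = 48 := this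
      omega
    · rw [if_neg h]
      obtain ⟨c, l, hcl, hc⟩ := ih (n / 10) (by omega) (by omega)
      exact ⟨c, l ++ [Nat.digitChar (n % 10)], by rw [hcl]; rfl, hc⟩

theorem decode_ge_one_aux (l : List Char) : ∀ a : Nat, 1 ≤ a →
    1 ≤ l.foldl (fun a c => 10 * a + (c.toNat - 48)) a := by
  induction l with
  | nil => intro a ha; exact ha
  | cons c l ih =>
    intro a ha
    exact ih (10 * a + (c.toNat - 48)) (by omega)

theorem decode_pos (c : Char) (l : List Char) (hc : c.isDigit = true) (h0 : c ≠ '0') :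
    1 ≤ decodeDigits (c :: l) := by
  rw [isDigit_iff] at hc
  have hne : c.toNat ≠ 48 := by
    intro h
    exact h0 (char_eq_of_toNat_eq (by rw [h]; rfl))
  show 1 ≤ l.foldl (fun a c => 10 * a + (c.toNat - 48)) (10 * 0 + (c.toNat - 48))
  exact decode_ge_one_aux l _ (by omega)

-- converse of decode_toDigits on canonical digit strings
theorem toDigits_decode (cs : List Char) (hd : ∀ c ∈ cs, c.isDigit = true)
    (hne : cs ≠ []) (h0 : cs.head? ≠ some '0') :
    Nat.toDigits 10 (decodeDigits cs) = cs := by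
  induction cs using List.reverseRecOn with
  | nil => exact absurd rfl hne
  | append_singleton l c ih =>
    have hc : c.isDigit = true := hd c (List.mem_append_right l (List.mem_singleton.mpr rfl))
    have hc' : c.toNat - 48 < 10 := by
      rw [isDigit_iff] at hc
      omega
    rw [decode_append]
    cases l with
    | nil =>
      simp only [decodeDigits, List.foldl_nil]
      have hz : 10 * 0 + (c.toNat - 48) = c.toNat - 48 := by omega
      rw [hz, Nat.toDigits_eq_if (by norm_num), if_pos hc', digitChar_eq_self c hc]
      rfl
    | cons c0 l0 =>
      have hh : c0 ≠ '0' := by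
        intro h
        exact h0 (by rw [h]; rfl)
      have hpos : 1 ≤ decodeDigits (c0 :: l0) :=
        decode_pos c0 l0 (hd c0 (List.mem_append_left _ (List.mem_cons_self))) hh
      rw [Nat.toDigits_eq_if (by norm_num), if_neg (by omega)]
      have hdiv : (10 * decodeDigits (c0 :: l0) + (c.toNat - 48)) / 10 = decodeDigits (c0 :: l0) := by
        omega
      have hmod : (10 * decodeDigits (c0 :: l0) + (c.toNat - 48)) % 10 = c.toNat - 48 := by
        omega
      rw [hdiv, hmod, digitChar_eq_self c hc,
        ih (fun x hx => hd x (List.mem_append_left _ hx)) (by simp) h0]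

-- PySem.Int.toChars of a positive int is Nat.toDigits
theorem toChars_pos (k : Int) (hk : 1 ≤ k) :
    PySem.Int.toChars k = Nat.toDigits 10 k.toNat := by
  unfold PySem.Int.toChars
  rw [if_neg (by omega)]

-- B's parse inverts B's name formatting: parse(base+'('+str(k)+')') = (base, k) for k ≥ 1
theorem bParse_bNew (b : String) (k : Int) (hk : 1 ≤ k) :
    bParse (bNew b k) = some (b, k) := by
  have htl : (bNew b k).toList
      = b.toList ++ '(' :: (Nat.toDigits 10 k.toNat ++ [')']) := by
    unfold bNew
    rw [String.toList_append, String.toList_append, String.toList_append,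
      PySem.Int.toList_toStr, toChars_pos k hk]
    simp
  obtain ⟨c0, l0, hcl, hc0⟩ := toDigits_head_ne_zero k.toNat (by omega)
  have hds : ∀ c ∈ Nat.toDigits 10 k.toNat, c.isDigit = true := toDigits_all_digit k.toNat
  have hrevds : ∀ c ∈ (Nat.toDigits 10 k.toNat).reverse, Char.isDigit c = true := by
    intro c hc; exact hds c (List.mem_reverse.mp hc)
  unfold bParse
  rw [htl]
  have hrev : (b.toList ++ '(' :: (Nat.toDigits 10 k.toNat ++ [')'])).reverse
      = ')' :: ((Nat.toDigits 10 k.toNat).reverse ++ '(' :: b.toList.reverse) := by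
    simp
  rw [hrev]
  simp only []
  rw [List.dropWhile_append_of_pos hrevds, List.takeWhile_append_of_pos hrevds]
  have hnotdig : Char.isDigit '(' = false := by decide
  have hdrop : ('(' :: b.toList.reverse).dropWhile Char.isDigit = '(' :: b.toList.reverse := by
    rw [List.dropWhile_cons_of_neg (by rw [hnotdig]; simp)]
  have htake : ('(' :: b.toList.reverse).takeWhile Char.isDigit = [] := by
    rw [List.takeWhile_cons_of_neg (by rw [hnotdig]; simp)]
  rw [hdrop, htake]
  have hne : (Nat.toDigits 10 k.toNat).reverse ≠ [] := by
    rw [hcl]; simp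
  have hlast : ((Nat.toDigits 10 k.toNat).reverse).getLast? = some c0 := by
    rw [← List.head?_reverse, List.reverse_reverse, hcl]; rfl
  have hcast : ((decodeDigits (Nat.toDigits 10 k.toNat) : Nat) : Int) = k := by
    rw [decode_toDigits]; omega
  simp [hne, hlast, hc0, List.reverse_reverse, String.ofList_toList, hcast]

-- B's parse is sound: a parsed name really has the shape base+'('+str(k)+')' with k ≥ 1
theorem bParse_sound (name : String) (b : String) (k : Int)
    (h : bParse name = some (b, k)) : name = bNew b k ∧ 1 ≤ k := by
  unfold bParse at h
  cases hrev : name.toList.reverse with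
  | nil => rw [hrev] at h; exact absurd h (by simp)
  | cons c rest =>
    rw [hrev] at h
    simp only [] at h
    by_cases hc : c = ')'
    · rw [if_pos hc] at h
      cases hdw : rest.dropWhile Char.isDigit with
      | nil => rw [hdw] at h; exact absurd h (by simp)
      | cons c2 btl =>
        rw [hdw] at h
        simp only [] at h
        by_cases hc2 : c2 = '('
        · rw [if_pos hc2] at h
          by_cases hds : rest.takeWhile Char.isDigit = []
          · rw [if_pos hds] at h; exact absurd h (by simp)
          · rw [if_neg hds] at h
            by_cases h0 : (rest.takeWhile Char.isDigit).getLast? = some '0'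
            · rw [if_pos h0] at h; exact absurd h (by simp)
            · rw [if_neg h0] at h
              have hb : b = String.ofList btl.reverse := by
                have := Option.some_injective _ h
                exact (congrArg Prod.fst this).symm
              have hkk : k = ((decodeDigits (rest.takeWhile Char.isDigit).reverse : Nat) : Int) := by
                have := Option.some_injective _ h
                exact (congrArg Prod.snd this).symm
              -- the digit string read left-to-right
              have hdig : ∀ x ∈ (rest.takeWhile Char.isDigit).reverse, x.isDigit = true := by
                intro x hx
                exact List.mem_takeWhile_imp (List.mem_reverse.mp hx)
              have hdne : (rest.takeWhile Char.isDigit).reverse ≠ [] := by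
                simpa using hds
              have hdh : ((rest.takeWhile Char.isDigit).reverse).head? ≠ some '0' := by
                rw [List.head?_reverse]; exact h0
              have hpos : 1 ≤ decodeDigits (rest.takeWhile Char.isDigit).reverse := by
                cases hE : (rest.takeWhile Char.isDigit).reverse with
                | nil => exact absurd hE hdne
                | cons x xs =>
                  refine decode_pos x xs (hdig x (by rw [hE]; exact List.mem_cons_self)) ?_
                  intro hx0
                  exact hdh (by rw [hE, hx0]; rfl)
              constructor
              · -- reconstruct name from its reversed decomposition
                have hrest : rest = rest.takeWhile Char.isDigit ++ ('(' :: btl) := by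
                  conv_lhs => rw [← List.takeWhile_append_dropWhile (p := Char.isDigit) (l := rest)]
                  rw [hdw, hc2]
                have hname : name.toList
                    = btl.reverse ++ '(' :: ((rest.takeWhile Char.isDigit).reverse ++ [')']) := by
                  have h1 : name.toList = (c :: rest).reverse := by
                    rw [← hrev, List.reverse_reverse]
                  rw [h1, hc]
                  conv_lhs => rw [hrest]
                  simp
                have hnew : (bNew (String.ofList btl.reverse) k).toList
                    = btl.reverse ++ '(' :: ((rest.takeWhile Char.isDigit).reverse ++ [')']) := by
                  unfold bNew
                  rw [String.toList_append, String.toList_append, String.toList_append,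
                    PySem.Int.toList_toStr, toChars_pos k (by omega), hkk]
                  rw [Int.toNat_natCast, toDigits_decode _ hdig hdne hdh,
                    String.toList_ofList]
                  simp
                rw [hb, ← String.ofList_toList (s := name), hname, ← hnew,
                  String.ofList_toList]
              · omega
        · rw [if_neg hc2] at h; exact absurd h (by simp)
    · rw [if_neg hc] at h; exact absurd h (by simp)

-- the two formatting helpers are literally the same function
theorem bNew_eq : bNew = aNewName := rfl

-- full injectivity of the formatted name (across bases), via the parser
theorem newName_inj (b b' : String) (j k : Int) (hj : 1 ≤ j) (hk : 1 ≤ k)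
    (h : aNewName b j = aNewName b' k) : b = b' ∧ j = k := by
  have h1 := bParse_bNew b j hj
  have h2 := bParse_bNew b' k hk
  rw [← bNew_eq] at h
  rw [h, h2] at h1
  have := Option.some_injective _ h1.symm
  exact ⟨congrArg Prod.fst this, congrArg Prod.snd this⟩

theorem aNewName_inj (n : String) (i j : Int) (hi : 0 ≤ i) (hj : 0 ≤ j)
    (h : aNewName n i = aNewName n j) : i = j := by
  unfold aNewName at h
  have h2 := congrArg String.toList h
  simp only [String.toList_append] at h2
  have h3 := List.append_cancel_left (List.append_cancel_right h2)
  rw [PySem.Int.toList_toStr, PySem.Int.toList_toStr] at h3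
  unfold PySem.Int.toChars at h3
  rw [if_neg (by omega), if_neg (by omega)] at h3
  have h4 := congrArg decodeDigits h3
  rw [decode_toDigits, decode_toDigits] at h4
  omega

-- pigeonhole: among k = 1 .. |done|+1 some candidate name is not in done
theorem exists_free (done : List String) (n : String) :
    ∃ j : Int, 1 ≤ j ∧ j ≤ (done.length : Int) + 1 ∧ done.contains (aNewName n j) = false := by
  by_contra hcon
  have hall : ∀ j : Int, 1 ≤ j → j ≤ (done.length : Int) + 1 → aNewName n j ∈ done := by
    intro j h1 h2
    cases hb : done.contains (aNewName n j) with
    | true => exact List.contains_iff_mem.mp hb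
    | false => exact absurd ⟨j, h1, h2, hb⟩ hcon
  have hnodupL : (List.map (fun i : Nat => aNewName n ((i : Int) + 1)) (List.range (done.length + 1))).Nodup := by
    refine List.Nodup.map_on ?_ List.nodup_range
    intro i hi j hj hij
    have := aNewName_inj n ((i : Int) + 1) ((j : Int) + 1) (by omega) (by omega) hij
    omega
  have hsub : (List.map (fun i : Nat => aNewName n ((i : Int) + 1)) (List.range (done.length + 1))) ⊆ done := by
    intro x hx
    simp only [List.mem_map, List.mem_range] at hx
    obtain ⟨i, hi, rfl⟩ := hx
    exact hall ((i : Int) + 1) (by omega) (by omega)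
  have h1 := List.toFinset_card_of_nodup hnodupL
  have h3 : (List.map (fun i : Nat => aNewName n ((i : Int) + 1)) (List.range (done.length + 1))).toFinset.card ≤ done.toFinset.card :=
    Finset.card_le_card (fun x hx => by
      rw [List.mem_toFinset] at hx ⊢
      exact hsub hx)
  have h4 := List.toFinset_card_le done
  rw [List.length_map, List.length_range] at h1
  omega

-- characterization of A's linear search: given a free candidate within fuel, the result is
-- the least free candidate ≥ the start
theorem aFind_char (done : List String) (n : String) :
    ∀ (fuel : Nat) (k : Int),
      (∃ j : Int, k ≤ j ∧ j < k + (fuel : Int) ∧ done.contains (aNewName n j) = false) →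
      done.contains (aNewName n (aFind done n k fuel)) = false ∧
      k ≤ aFind done n k fuel ∧
      ∀ j : Int, k ≤ j → j < aFind done n k fuel → done.contains (aNewName n j) = true := by
  intro fuel
  induction fuel with
  | zero =>
    intro k ⟨j, h1, h2, _⟩
    simp only [Nat.cast_zero] at h2
    omega
  | succ f ih =>
    intro k ⟨j, h1, h2, h3⟩
    simp only [aFind]
    by_cases hc : done.contains (aNewName n k) = true
    · rw [if_pos hc]
      have hjk : k + 1 ≤ j := by
        rcases eq_or_lt_of_le h1 with heq | hlt
        · rw [← heq] at h3; rw [hc] at h3; exact absurd h3 (by simp)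
        · omega
      obtain ⟨c1, c2, c3⟩ := ih (k + 1) ⟨j, hjk, by push_cast at h2 ⊢; omega, h3⟩
      refine ⟨c1, by omega, ?_⟩
      intro j' hj1 hj2
      rcases eq_or_lt_of_le hj1 with heq | hlt
      · rw [← heq]; exact hc
      · exact c3 j' (by omega) hj2
    · have hc' : done.contains (aNewName n k) = false := by
        cases hb : done.contains (aNewName n k) with
        | true => exact absurd hb hc
        | false => rfl
      rw [if_neg (by rw [hc']; simp)]
      exact ⟨hc', le_refl k, fun j' hj1 hj2 => by omega⟩

-- a free slot with everything below it taken IS A's search result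
theorem least_free_unique (done : List String) (n : String) (r : Int) (hr : 1 ≤ r)
    (hfree : done.contains (aNewName n r) = false)
    (hbelow : ∀ j : Int, 1 ≤ j → j < r → done.contains (aNewName n j) = true) :
    r = aFind done n 1 (done.length + 1) := by
  obtain ⟨jf, hf1, hf2, hf3⟩ := exists_free done n
  obtain ⟨a1, a2, a3⟩ := aFind_char done n (done.length + 1) 1 ⟨jf, hf1, by push_cast; omega, hf3⟩
  set rA := aFind done n 1 (done.length + 1) with hra
  rcases lt_trichotomy r rA with h | h | h
  · have := a3 r hr h
    rw [hfree] at this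
    exact absurd this (by simp)
  · exact h
  · have := hbelow rA a2 h
    rw [a1] at this
    exact absurd this (by simp)

-- invariant of the slot structure: entries (b,k) ↦ m mean slots k..m-1 of b are all used,
-- and every used name of shape b+'('+str(k)+')' has an entry at (b,k)
def InvA (done : List String) (parent : PySem.Dict (String × Int) Int) : Prop :=
  ∀ b k m, parent.get? (b, k) = some m →
    1 ≤ k ∧ k < m ∧ ∀ j : Int, k ≤ j → j < m → done.contains (aNewName b j) = true

def InvB (done : List String) (parent : PySem.Dict (String × Int) Int) : Prop :=
  ∀ b k, 1 ≤ k → done.contains (aNewName b k) = true → parent.contains (b, k) = true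

theorem contains_append_left {l : List String} {x y : String}
    (h : l.contains x = true) : (l ++ [y]).contains x = true := by
  rw [List.contains_iff_mem] at h ⊢
  exact List.mem_append_left _ h

theorem invA_append (done : List String) (p : PySem.Dict (String × Int) Int) (x : String)
    (h : InvA done p) : InvA (done ++ [x]) p := by
  intro b k m hg
  obtain ⟨h1, h2, h3⟩ := h b k m hg
  exact ⟨h1, h2, fun j hj1 hj2 => contains_append_left (h3 j hj1 hj2)⟩

theorem contains_foldl_insert (ch : List Int) (n : String) (r : Int) (key : String × Int) :
    ∀ p : PySem.Dict (String × Int) Int, p.contains key = true →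
      (ch.foldl (fun d c => d.insert (n, c) r) p).contains key = true := by
  induction ch with
  | nil => intro p h; exact h
  | cons c ch ih =>
    intro p h
    refine ih _ ?_
    rw [PySem.Dict.contains_insert, h]
    simp

-- find: with the invariant and some free slot within fuel, the walk ends at the least free
-- slot ≥ k and every visited chain key lies in [k, root)
theorem bFind_spec (done : List String) (b : String) :
    ∀ (fuel : Nat) (k : Int) (parent : PySem.Dict (String × Int) Int),
      InvA done parent → InvB done parent → 1 ≤ k →
      (∃ j : Int, k ≤ j ∧ j < k + (fuel : Int) ∧ done.contains (aNewName b j) = false) →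
      done.contains (aNewName b (bFind parent b k fuel).1) = false ∧
      k ≤ (bFind parent b k fuel).1 ∧
      (∀ j : Int, k ≤ j → j < (bFind parent b k fuel).1 →
        done.contains (aNewName b j) = true) ∧
      (∀ c ∈ (bFind parent b k fuel).2, k ≤ c ∧ c < (bFind parent b k fuel).1) := by
  intro fuel
  induction fuel with
  | zero =>
    intro k parent _ _ _ ⟨j, h1, h2, _⟩
    simp only [Nat.cast_zero] at h2
    omega
  | succ f ih =>
    intro k parent hA hB hk ⟨j, h1, h2, h3⟩
    simp only [bFind]
    cases hg : parent.get? (b, k) with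
    | none =>
      simp only
      have hfree : done.contains (aNewName b k) = false := by
        cases hc : done.contains (aNewName b k) with
        | false => rfl
        | true =>
          have := hB b k hk hc
          rw [PySem.Dict.contains_eq_isSome_get?, hg] at this
          exact absurd this (by simp)
      exact ⟨hfree, le_refl k, fun j' hj1 hj2 => by omega, fun c hc => by simp at hc⟩
    | some m =>
      simp only
      obtain ⟨hm1, hm2, hm3⟩ := hA b k m hg
      have hjm : m ≤ j := by
        by_contra hlt
        have := hm3 j h1 (by omega)
        rw [h3] at this
        exact absurd this (by simp)
      obtain ⟨c1, c2, c3, c4⟩ := ih m parent hA hB (by omega)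
        ⟨j, hjm, by push_cast at h2 ⊢; omega, h3⟩
      refine ⟨c1, by omega, ?_, ?_⟩
      · intro j' hj1 hj2
        rcases lt_or_ge j' m with hlt | hge
        · exact hm3 j' hj1 hlt
        · exact c3 j' hge hj2
      · intro c hc
        rcases List.mem_cons.mp hc with rfl | hc'
        · exact ⟨le_refl c, by omega⟩
        · obtain ⟨d1, d2⟩ := c4 c hc'
          exact ⟨by omega, d2⟩

-- path compression keeps InvA: every rewritten entry (b,c) ↦ r still covers only taken slots
theorem invA_foldl_compress (done : List String) (n : String) (r : Int) (ch : List Int)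
    (hch : ∀ c ∈ ch, 1 ≤ c ∧ c < r)
    (hbelow : ∀ j : Int, 1 ≤ j → j < r → done.contains (aNewName n j) = true) :
    ∀ p : PySem.Dict (String × Int) Int, InvA done p →
      InvA done (ch.foldl (fun d c => d.insert (n, c) r) p) := by
  induction ch with
  | nil => intro p h; exact h
  | cons c ch ih =>
    intro p h
    refine ih (fun c' hc' => hch c' (List.mem_cons_of_mem _ hc')) _ ?_
    intro b k m hg
    rw [PySem.Dict.get?_insert] at hg
    by_cases hkey : (b, k) = (n, c)
    · rw [if_pos hkey] at hg
      obtain ⟨rfl, rfl⟩ := Prod.mk.injEq .. ▸ hkey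
      injection hg with hg
      obtain ⟨e1, e2⟩ := hch k List.mem_cons_self
      subst hg
      exact ⟨e1, e2, fun j hj1 hj2 => hbelow j (by omega) hj2⟩
    · rw [if_neg hkey] at hg
      exact h b k m hg

-- A's loop, with the freshly produced suffix split from the prefix it threads
def aTail (done : List String) : List String → List String
  | [] => []
  | n :: rest =>
    if done.contains n then
      let nn := aNewName n (aFind done n 1 (done.length + 1))
      nn :: aTail (done ++ [nn]) rest
    else
      n :: aTail (done ++ [n]) rest

theorem aLoop_eq_append (rest : List String) :
    ∀ done : List String, aLoop done rest = done ++ aTail done rest := by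
  induction rest with
  | nil => intro done; simp [aLoop, aTail]
  | cons n rest ih =>
    intro done
    show (if done.contains n then _ else _) = done ++ (if done.contains n then _ else _)
    by_cases hc : done.contains n
    · rw [if_pos hc, if_pos hc, ih]
      simp
    · rw [if_neg hc, if_neg hc, ih]
      simp

theorem contains_append_singleton (l : List String) (x y : String) :
    (l ++ [y]).contains x = (l.contains x || x == y) := by
  rw [List.contains_append]
  simp [Bool.beq_eq_decide_eq]

-- the main simulation: B's loop with a valid slot structure produces A's tail
theorem bLoop_eq (rest : List String) :
    ∀ (done : List String) (parent : PySem.Dict (String × Int) Int) (out : List String),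
      InvA done parent → InvB done parent →
      bLoop done parent out rest = out ++ aTail done rest := by
  induction rest with
  | nil => intro done parent out _ _; simp [bLoop, aTail]
  | cons n rest ih =>
    intro done parent out hA hB
    have hset : PySem.Set.contains done n = done.contains n := rfl
    by_cases hc : done.contains n = true
    · -- duplicate: the allocated root is A's least free suffix
      obtain ⟨jf, hf1, hf2, hf3⟩ := exists_free done n
      obtain ⟨s1, s2, s3, s4⟩ := bFind_spec done n (done.length + 1) 1 parent hA hB (by omega)
        ⟨jf, hf1, by push_cast; omega, hf3⟩
      set r := (bFind parent n 1 (done.length + 1)).1 with hrdef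
      set ch := (bFind parent n 1 (done.length + 1)).2 with hchdef
      have hreq : r = aFind done n 1 (done.length + 1) :=
        least_free_unique done n r s2 s1 s3
      have hfresh : aNewName n r ∉ done := by
        rw [← List.contains_iff_mem, s1]
        simp
      have hadd : PySem.Set.add done (bNew n r) = done ++ [aNewName n r] := by
        rw [bNew_eq]
        unfold PySem.Set.add
        rw [if_neg]
        intro hmem
        exact hfresh (List.contains_iff_mem.mp hmem)
      -- the updated slot structure is valid for the extended prefix
      have hA1 : InvA done (ch.foldl (fun d c => d.insert (n, c) r) parent) :=
        invA_foldl_compress done n r ch s4 s3 parent hA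
      have hA2 : InvA (done ++ [aNewName n r])
          ((ch.foldl (fun d c => d.insert (n, c) r) parent).insert (n, r) (r + 1)) := by
        intro b k m hg
        rw [PySem.Dict.get?_insert] at hg
        by_cases hkey : (b, k) = (n, r)
        · rw [if_pos hkey] at hg
          have hb1 : b = n := congrArg Prod.fst hkey
          have hk2 : k = r := congrArg Prod.snd hkey
          subst hb1; subst hk2
          injection hg with hg
          subst hg
          refine ⟨s2, by omega, ?_⟩
          intro j hj1 hj2
          have hjr : j = r := by omega
          subst hjr
          rw [contains_append_singleton]
          simp
        · rw [if_neg hkey] at hg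
          exact invA_append done _ (aNewName n r) hA1 b k m hg
      have hB2 : InvB (done ++ [aNewName n r])
          ((ch.foldl (fun d c => d.insert (n, c) r) parent).insert (n, r) (r + 1)) := by
        intro b k hk hcb
        rw [contains_append_singleton] at hcb
        rcases Bool.or_eq_true_iff.mp hcb with hold | hnew
        · have h1 := hB b k hk hold
          have h2 := contains_foldl_insert ch n r (b, k) parent h1
          rw [PySem.Dict.contains_insert, h2]
          simp
        · have heq : aNewName b k = aNewName n r := eq_of_beq hnew
          obtain ⟨rfl, rfl⟩ := newName_inj b n k r hk s2 heq
          exact PySem.Dict.contains_insert_self _ _ _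
      simp only [bLoop]
      rw [hset, if_pos hc, ← hrdef, ← hchdef, hadd, bNew_eq,
        ih _ _ _ hA2 hB2]
      simp only [aTail, hc, if_pos, ← hreq]
      simp
    · -- fresh name: record its slot (if it has the suffix shape) and keep the invariant
      have hc' : done.contains n = false := by
        cases hb : done.contains n with
        | true => exact absurd hb hc
        | false => rfl
      have hadd : PySem.Set.add done n = done ++ [n] := by
        unfold PySem.Set.add
        rw [if_neg]
        show ¬ List.contains done n = true
        rw [hc']
        simp
      simp only [bLoop]
      rw [hset, if_neg (by rw [hc']; simp)]
      have htail : out ++ aTail done (n :: rest) = out ++ [n] ++ aTail (done ++ [n]) rest := by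
        simp only [aTail, hc', Bool.false_eq_true]
        simp
      cases hp : bParse n with
      | some bk =>
        obtain ⟨hshape, hk1⟩ := bParse_sound n bk.1 bk.2 (by rw [hp])
        have hA2 : InvA (done ++ [n]) (parent.insert bk (bk.2 + 1)) := by
          intro b k m hg
          rw [PySem.Dict.get?_insert] at hg
          by_cases hkey : (b, k) = bk
          · rw [if_pos hkey] at hg
            injection hg with hg
            subst hg
            subst hkey
            refine ⟨hk1, by omega, ?_⟩
            intro j hj1 hj2
            have : j = k := by omega
            subst this
            rw [contains_append_singleton, hshape, bNew_eq]
            simp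
          · rw [if_neg hkey] at hg
            exact invA_append done _ n hA b k m hg
        have hB2 : InvB (done ++ [n]) (parent.insert bk (bk.2 + 1)) := by
          intro b k hk hcb
          rw [contains_append_singleton] at hcb
          rcases Bool.or_eq_true_iff.mp hcb with hold | hnew
          · have := hB b k hk hold
            rw [PySem.Dict.contains_insert, this]
            simp
          · have heq : aNewName b k = n := eq_of_beq hnew
            rw [hshape, bNew_eq] at heq
            obtain ⟨rfl, rfl⟩ := newName_inj b bk.1 k bk.2 hk hk1 heq
            have : (bk.1, bk.2) = bk := rfl
            rw [this]
            exact PySem.Dict.contains_insert_self _ _ _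
        simp only []
        rw [hadd, ih _ _ _ hA2 hB2, htail]
      | none =>
        have hA2 : InvA (done ++ [n]) parent := invA_append done parent n hA
        have hB2 : InvB (done ++ [n]) parent := by
          intro b k hk hcb
          rw [contains_append_singleton] at hcb
          rcases Bool.or_eq_true_iff.mp hcb with hold | hnew
          · exact hB b k hk hold
          · have heq : aNewName b k = n := eq_of_beq hnew
            have := bParse_bNew b k hk
            rw [bNew_eq, heq, hp] at this
            exact absurd this (by simp)
        simp only []
        rw [hadd, ih _ _ _ hA2 hB2, htail]

theorem invA_empty : InvA [] PySem.Dict.empty := by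
  intro b k m hg
  simp [PySem.Dict.get?, PySem.Dict.empty] at hg

theorem invB_empty : InvB [] PySem.Dict.empty := by
  intro b k _ hc
  simp at hc

-- ===== VERDICT (by name: the statement is the Claim_ definition above) =====
theorem fileNaming_spec : Claim_equal_fileNaming := by
  intro names _
  unfold Spec_fileNaming fileNaming fileNaming_alt
  rw [aLoop_eq_append]
  show [] ++ aTail [] names = bLoop [] PySem.Dict.empty [] names
  rw [bLoop_eq names [] PySem.Dict.empty [] invA_empty invB_empty]
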